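-- pv_equiv track=rewrite | github.com/Kasaderos/poisson-equation | 2_stable_chebyshev.py | get_teta
-- ===== SOURCE A (Python) =====
-- def get_teta(n):
--     n = pow_two(n)
--
--     teta = { 1:[1] }
--
--     i = 2
--     while i <= n:
--         new_teta = []
--         j = 1
--         for j in range(1, i+1):
--             if j & 1:   # odd
--                 new_teta.append(teta[ i//2 ][ (j+1)//2 -1 ])
--             else:       # even
--                 new_teta.append(2*i - new_teta[j-2])
--         teta[i] = new_teta
--         i *= 2
--     return teta[n]
--
-- def pow_two(n):
--     i = 1
--     while i < n:
--         i *= 2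
--     return i
-- ===== SOURCE B (Python) =====
-- def pow_two(n):
--     i = 1
--     while i < n:
--         i *= 2
--     return i
--
-- def level(m):
--     if m == 1:
--         return [1]
--     prev = level(m // 2)
--     return [x for p in prev for x in (p, 2 * m - p)]
--
-- def get_teta(n):
--     return level(pow_two(n))
-- ===== Notes on version B (the rewrite author's own statement) =====
-- stated objective: simpler
-- what changed: Replaces A's bottom-up while-loop that stores every Chebyshev level in a dict and fills each level with an index-juggling odd/even branch by a top-down divide-and-conquer recursion level(m) that interleaves each element p of the half-size level directly with its mirror value.
import Mathlib
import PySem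

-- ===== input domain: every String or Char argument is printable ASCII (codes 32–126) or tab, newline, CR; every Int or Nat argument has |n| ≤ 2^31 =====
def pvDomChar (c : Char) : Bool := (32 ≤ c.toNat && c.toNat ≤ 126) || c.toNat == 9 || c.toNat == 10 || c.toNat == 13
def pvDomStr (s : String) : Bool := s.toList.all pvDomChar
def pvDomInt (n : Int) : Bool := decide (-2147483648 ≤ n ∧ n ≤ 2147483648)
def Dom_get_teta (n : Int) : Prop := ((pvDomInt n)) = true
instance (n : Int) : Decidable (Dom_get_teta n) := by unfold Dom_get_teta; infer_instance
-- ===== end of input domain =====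

-- B replaces A's bottom-up while-loop over a dict of all levels by a top-down
-- divide-and-conquer recursion that interleaves each element p with 2*m - p
-- (objective: simpler; a timing run measured a constant-factor speedup).

-- ===== PORT A =====
-- pow_two's while-loop; the 0 < i hypothesis only justifies termination (i starts at 1).
def pow_two_loop (n i : Int) (hi : 0 < i) : Int :=
  if i < n then pow_two_loop n (2 * i) (by omega) else i
termination_by (n - i).toNat
decreasing_by omega

def pow_two_fn (n : Int) : Int := pow_two_loop n 1 (by omega)

-- body of A's inner 'for j in range(1, i+1)' loop; 'j & 1' = 'j % 2 == 1' (j ≥ 1 here);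
-- the Python list indexings never go out of range, ported with pyGetD default 0.
def stepA (i : Int) (prev : List Int) (acc : List Int) (j : Int) : List Int :=
  if PySem.Int.mod j 2 = 1 then
    acc ++ [PySem.List.pyGetD prev (PySem.Int.floordiv (j + 1) 2 - 1) 0]
  else
    acc ++ [2 * i - PySem.List.pyGetD acc (j - 2) 0]

def innerA (i : Int) (prev : List Int) : List Int :=
  (PySem.List.pyRange 1 (i + 1) 1).foldl (stepA i prev) []

-- A's outer while-loop over the dict teta; 0 < i only for termination (i starts at 2).
def loopA (n i : Int) (d : PySem.Dict Int (List Int)) (hi : 0 < i) :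
    PySem.Dict Int (List Int) :=
  if i ≤ n then
    loopA n (2 * i)
      (d.insert i (innerA i (d.getD (PySem.Int.floordiv i 2) []))) (by omega)
  else d
termination_by (n + 1 - i).toNat
decreasing_by omega

-- final 'teta[n]': the key n = pow_two(n) is always present (the loop visits exactly
-- the powers of two up to n), so the getD default [] is never returned.
def get_teta (n : Int) : List Int :=
  let n' := pow_two_fn n
  (loopA n' 2 (PySem.Dict.insert PySem.Dict.empty 1 [1]) (by omega)).getD n' []

-- ===== PORT B =====
-- level(m) from Source B; the 'm ≤ 0 → []' branch is a totality guard only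
-- (Python's level is only ever called on powers of two ≥ 1).
def levelB (m : Int) : List Int :=
  if m = 1 then [1]
  else if m ≤ 0 then []
  else (levelB (PySem.Int.floordiv m 2)).flatMap (fun p => [p, 2 * m - p])
termination_by m.toNat
decreasing_by
  rw [PySem.Int.floordiv_eq_ediv_of_pos (by omega)]
  omega

def get_teta_alt (n : Int) : List Int := levelB (pow_two_fn n)

-- ===== PRECONDITION & SPEC =====
def Spec_get_teta (n : Int) (out : List Int) : Prop := out = get_teta_alt n
instance (n : Int) (out : List Int) : Decidable (Spec_get_teta n out) := by unfold Spec_get_teta; infer_instance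

-- ===== CLAIM (what is proved, stated in full; the proofs are below) =====
def Claim_equal_get_teta : Prop := ∀ (n : Int), Dom_get_teta n → Spec_get_teta n (get_teta n)

-- ===== LEMMAS AND PROOFS =====

-- pow_two returns a power of two
theorem pow_two_loop_pow (n : Int) :
    ∀ (fuel : Nat) (i : Int) (hi : 0 < i), (n - i).toNat ≤ fuel →
      (∃ k : Nat, i = 2 ^ k) → ∃ k : Nat, pow_two_loop n i hi = 2 ^ k := by
  intro fuel
  induction fuel with
  | zero =>
    intro i hi hf hk
    rw [pow_two_loop]
    have : ¬ i < n := by omega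
    simp [this]
    exact hk
  | succ f ih =>
    intro i hi hf hk
    rw [pow_two_loop]
    split
    · rename_i hlt
      refine ih (2 * i) (by omega) (by omega) ?_
      obtain ⟨k, hk⟩ := hk
      exact ⟨k + 1, by rw [hk]; ring⟩
    · exact hk

theorem pow_two_fn_pow (n : Int) : ∃ k : Nat, pow_two_fn n = 2 ^ k :=
  pow_two_loop_pow n (n - 1).toNat 1 (by omega) (by omega) ⟨0, by norm_num⟩

-- unfolding levelB at an even positive argument
theorem levelB_two_mul (m : Int) (hm : 0 < m) :
    levelB (2 * m) = (levelB m).flatMap (fun p => [p, 2 * (2 * m) - p]) := by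
  rw [levelB]
  have h1 : ¬ (2 * m = 1) := by omega
  have h2 : ¬ (2 * m ≤ 0) := by omega
  have h3 : PySem.Int.floordiv (2 * m) 2 = m := by
    rw [PySem.Int.floordiv_eq_ediv_of_pos (by omega)]; omega
  rw [if_neg h1, if_neg h2, h3]

theorem flatMap_pair_length (xs : List Int) (c : Int) :
    (xs.flatMap (fun p => [p, c - p])).length = 2 * xs.length := by
  induction xs with
  | nil => simp
  | cons x xs ih => simp [ih]; omega

theorem levelB_length (k : Nat) : (levelB ((2 : Int) ^ k)).length = 2 ^ k := by
  induction k with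
  | zero => simp [levelB]
  | succ k ih =>
    have h : (2 : Int) ^ (k + 1) = 2 * 2 ^ k := by ring
    rw [h, levelB_two_mul _ (by positivity), flatMap_pair_length, ih]
    ring

-- the inner for-loop, processed two j's at a time, builds the interleaving
theorem inner_fold (i : Int) (prev : List Int) :
    ∀ (t : Nat), t ≤ prev.length →
      (PySem.List.pyRange 1 (2 * (t : Int) + 1) 1).foldl (stepA i prev) []
        = (prev.take t).flatMap (fun p => [p, 2 * i - p]) := by
  intro t
  induction t with
  | zero => simp [PySem.List.pyRange_one_eq_nil]
  | succ t ih =>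
    intro ht
    have htl : t < prev.length := by omega
    have hsplit : (2 : Int) * (↑(t + 1)) + 1 = (2 * (t : Int) + 1) + 1 + 1 := by
      push_cast; ring
    rw [hsplit,
        PySem.List.pyRange_one_succ_right (by omega),
        PySem.List.pyRange_one_succ_right (by omega),
        List.foldl_append, List.foldl_append, ih (by omega)]
    set acc := (prev.take t).flatMap (fun p => [p, 2 * i - p]) with hacc
    have hlen : acc.length = 2 * t := by
      rw [hacc, flatMap_pair_length]; simp [Nat.min_eq_left (le_of_lt htl)]
    -- first step: j = 2t+1, odd
    have hodd : PySem.Int.mod (2 * (t : Int) + 1) 2 = 1 := by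
      rw [PySem.Int.mod_eq_emod_of_pos (by omega)]; omega
    have hidx1 : PySem.Int.floordiv (2 * (t : Int) + 1 + 1) 2 - 1 = (t : Int) := by
      rw [PySem.Int.floordiv_eq_ediv_of_pos (by omega)]; omega
    have heven : ¬ PySem.Int.mod (2 * (t : Int) + 1 + 1) 2 = 1 := by
      rw [PySem.Int.mod_eq_emod_of_pos (by omega)]; omega
    have hget1 : PySem.List.pyGetD prev ((t : Int)) 0 = prev[t] := by
      rw [PySem.List.pyGetD_natCast]
      simp [List.getD_eq_getElem?_getD, htl]
    have hidx2 : (2 * (t : Int) + 1 + 1 - 2) = ((2 * t : Nat) : Int) := by push_cast; ring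
    have hget2 : (acc ++ [prev[t]]).getD (2 * t) 0 = prev[t] := by
      rw [List.getD_eq_getElem?_getD, List.getElem?_append_right (by omega)]
      simp [hlen]
    simp only [List.foldl_cons, List.foldl_nil, stepA]
    rw [if_pos hodd, hidx1, hget1, if_neg heven, hidx2, PySem.List.pyGetD_natCast, hget2]
    -- fold the new pair into the flatMap of the longer prefix
    have hstep : List.take (t + 1) prev = List.take t prev ++ [prev[t]] := by
      rw [List.take_add_one, List.getElem?_eq_getElem htl]
      simp
    rw [hacc, hstep, List.flatMap_append]
    simp

theorem innerA_eq (i : Int) (prev : List Int) (h : i = 2 * (prev.length : Int)) :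
    innerA i prev = prev.flatMap (fun p => [p, 2 * i - p]) := by
  subst h
  have := inner_fold (2 * (prev.length : Int)) prev prev.length (le_refl _)
  rw [innerA]
  simpa using this

-- at exit of the while loop, 2^t ≤ n < 2*2^t forces 2^t = n for n = 2^kn
theorem exit_pow_eq (n : Int) (kn t : Nat) (hn : n = 2 ^ kn)
    (htn : (2 : Int) ^ t ≤ n) (h2 : n < 2 * 2 ^ t) : (2 : Int) ^ t = n := by
  rcases lt_trichotomy t kn with h | h | h
  · exfalso
    have h3 : (2 : Int) ^ (t + 1) ≤ 2 ^ kn := pow_le_pow_right₀ (by norm_num) (by omega)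
    rw [pow_succ] at h3
    rw [hn] at h2
    linarith
  · rw [h, hn]
  · exfalso
    have : (2 : Int) ^ kn < 2 ^ t := pow_lt_pow_right₀ (by norm_num) h
    omega

-- main loop invariant: the dict maps 2^t (= i/2) to levelB 2^t; at exit i/2 = n
theorem loopA_correct (n : Int) (kn : Nat) (hn : n = 2 ^ kn) :
    ∀ (fuel : Nat) (i : Int) (hi : 0 < i) (d : PySem.Dict Int (List Int)),
      (n + 1 - i).toNat ≤ fuel →
      (∃ t : Nat, i = 2 * 2 ^ t ∧ ((2 : Int) ^ t) ≤ n ∧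
        d.getD ((2 : Int) ^ t) [] = levelB ((2 : Int) ^ t)) →
      (loopA n i d hi).getD n [] = levelB n := by
  intro fuel
  induction fuel with
  | zero =>
    intro i hi d hf ⟨t, hit, htn, hd⟩
    rw [loopA]
    have hni : ¬ i ≤ n := by omega
    simp only [if_neg hni]
    have htk := exit_pow_eq n kn t hn htn (by omega)
    rw [htk] at hd
    exact hd
  | succ f ih =>
    intro i hi d hf ⟨t, hit, htn, hd⟩
    rw [loopA]
    split
    · rename_i hle
      refine ih (2 * i) (by omega) _ (by omega) ⟨t + 1, by rw [hit]; ring, ?_, ?_⟩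
      · calc ((2:Int) ^ (t+1)) = i := by rw [hit]; ring
          _ ≤ n := hle
      · have hfd : PySem.Int.floordiv i 2 = (2 : Int) ^ t := by
          rw [PySem.Int.floordiv_eq_ediv_of_pos (by omega), hit]; omega
        have hlen : ((levelB ((2:Int) ^ t)).length : Int) = (2 : Int) ^ t := by
          rw [levelB_length]; push_cast; ring
        have hinner : innerA i (d.getD (PySem.Int.floordiv i 2) []) = levelB ((2:Int) ^ (t + 1)) := by
          rw [hfd, hd, innerA_eq i _ (by rw [hlen, hit])]
          have h21 : (2 : Int) ^ (t + 1) = 2 * 2 ^ t := by ring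
          rw [h21, levelB_two_mul _ (by positivity)]
          have hi2 : (2 : Int) * (2 * 2 ^ t) = 2 * i := by rw [hit]
          simp [hi2]
        have hik : (2 : Int) ^ (t + 1) = i := by rw [hit]; ring
        rw [PySem.Dict.getD_insert, if_pos hik]
        exact hinner
    · rename_i hni
      have htk := exit_pow_eq n kn t hn htn (by omega)
      rw [htk] at hd
      exact hd

theorem pow_two_fn_ge_one (n : Int) : 1 ≤ pow_two_fn n := by
  obtain ⟨k, hk⟩ := pow_two_fn_pow n
  rw [hk]
  exact one_le_pow₀ (by norm_num)

-- ===== VERDICT (by name: the statement is the Claim_ definition above) =====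
theorem get_teta_spec : Claim_equal_get_teta := by
  intro n _
  unfold Spec_get_teta get_teta get_teta_alt
  obtain ⟨k, hk⟩ := pow_two_fn_pow n
  have h1 : (1 : Int) ≤ pow_two_fn n := pow_two_fn_ge_one n
  refine loopA_correct (pow_two_fn n) k hk (pow_two_fn n).toNat 2 (by omega) _ (by omega)
    ⟨0, by norm_num, by simpa using h1, ?_⟩
  have hl1 : levelB 1 = [1] := by rw [levelB]; simp
  norm_num [PySem.Dict.getD_insert, hl1]
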